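-- pv_equiv track=rewrite | github.com/Aasthaengg/IBMdataset | Python_codes/p02269/s905514508.py | convert
-- ===== SOURCE A (Python) =====
-- def convert(moji):
--     l_moji = len(moji)
--     num = 0
--     for j in range(l_moji):
--         keta = 10 ** (l_moji - j - 1)
--         if moji[j] == 'A':
--             num += keta * 1
--         if moji[j] == 'C':
--             num += keta * 2
--         if moji[j] == 'G':
--             num += keta * 3
--         if moji[j] == 'T':
--             num += keta * 4
--     return num
-- ===== SOURCE B (Python) =====
-- def convert(moji):
--     num = 0
--     for ch in moji:
--         if ch == 'A':
--             d = 1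
--         elif ch == 'C':
--             d = 2
--         elif ch == 'G':
--             d = 3
--         elif ch == 'T':
--             d = 4
--         else:
--             d = 0
--         num = num * 10 + d
--     return num
-- ===== Notes on version B (the rewrite author's own statement) =====
-- stated objective: faster
-- what changed: Replaced the positional-weight sum (a fresh big-int power 10**(len-j-1) computed at every index) with Horner's method: one left-to-right pass over the characters doing num = num*10 + digit(ch), no exponentiation at all.
import Mathlib
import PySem

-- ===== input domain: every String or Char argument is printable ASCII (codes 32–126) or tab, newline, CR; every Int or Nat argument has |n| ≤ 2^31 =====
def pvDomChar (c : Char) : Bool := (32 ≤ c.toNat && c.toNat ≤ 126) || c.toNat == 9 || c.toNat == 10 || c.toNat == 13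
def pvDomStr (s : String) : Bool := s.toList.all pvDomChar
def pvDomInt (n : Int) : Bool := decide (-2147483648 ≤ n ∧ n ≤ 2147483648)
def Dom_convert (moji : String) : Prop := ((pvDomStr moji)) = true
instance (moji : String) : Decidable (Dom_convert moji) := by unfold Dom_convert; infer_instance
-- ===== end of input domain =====

-- B replaces A's per-position power 10**(len-j-1) with Horner's method (num = num*10 + digit); measurably faster on long strings.

-- ===== PORT A =====
def convert (moji : String) : Int :=
  let l_moji : Int := PySem.Str.len moji
  (PySem.List.pyRange 0 l_moji).foldl (fun num j =>
    let keta : Int := 10 ^ (l_moji - j - 1).toNat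
    let num := if PySem.Str.pyGet? moji j = some 'A' then num + keta * 1 else num
    let num := if PySem.Str.pyGet? moji j = some 'C' then num + keta * 2 else num
    let num := if PySem.Str.pyGet? moji j = some 'G' then num + keta * 3 else num
    if PySem.Str.pyGet? moji j = some 'T' then num + keta * 4 else num) 0

-- ===== PORT B =====
def pvDigit (c : Char) : Int :=
  if c = 'A' then 1 else if c = 'C' then 2 else if c = 'G' then 3
  else if c = 'T' then 4 else 0

def convert_alt (moji : String) : Int :=
  moji.toList.foldl (fun num ch => num * 10 + pvDigit ch) 0

-- ===== PRECONDITION & SPEC =====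
def Spec_convert (moji : String) (out : Int) : Prop := out = convert_alt moji
instance (moji : String) (out : Int) : Decidable (Spec_convert moji out) := by unfold Spec_convert; infer_instance

-- ===== CLAIM (what is proved, stated in full; the proofs are below) =====
def Claim_equal_convert : Prop := ∀ (moji : String), Dom_convert moji → Spec_convert moji (convert moji)

-- ===== LEMMAS AND PROOFS =====

-- digit of the optional character A reads at index j (0 when out of range)
def pvDigitOpt (o : Option Char) : Int := (o.map pvDigit).getD 0

-- A's loop body collapses to a single additive term
theorem pv_body_eq (s : String) (l num j : Int) :
    (let keta : Int := 10 ^ (l - j - 1).toNat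
     let num := if PySem.Str.pyGet? s j = some 'A' then num + keta * 1 else num
     let num := if PySem.Str.pyGet? s j = some 'C' then num + keta * 2 else num
     let num := if PySem.Str.pyGet? s j = some 'G' then num + keta * 3 else num
     if PySem.Str.pyGet? s j = some 'T' then num + keta * 4 else num)
    = num + 10 ^ ((l - j - 1).toNat) * pvDigitOpt (PySem.Str.pyGet? s j) := by
  cases h : PySem.Str.pyGet? s j with
  | none => simp [pvDigitOpt]
  | some c =>
      simp only [pvDigitOpt, Option.map_some, Option.getD_some, Option.some.injEq, pvDigit]
      split_ifs <;> simp_all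

-- the positional-weight sum over indices equals the Horner fold, at the List Char level
theorem pv_sum_eq_horner (cs : List Char) :
    ((PySem.List.pyRange 0 (cs.length : Int)).map
        (fun j => (10:Int) ^ (((cs.length : Int) - j - 1).toNat) *
          pvDigitOpt (PySem.List.pyGet? cs j))).sum
    = cs.foldl (fun num ch => num * 10 + pvDigit ch) 0 := by
  induction cs using List.reverseRecOn with
  | nil => simp [PySem.List.pyRange_one_eq_nil]
  | append_singleton cs c ih =>
      have hn : ((cs ++ [c]).length : Int) = (cs.length : Int) + 1 := by
        simp
      rw [hn, PySem.List.pyRange_one_succ_right (by positivity), List.map_append,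
        List.sum_append, List.foldl_append]
      have hlast : PySem.List.pyGet? (cs ++ [c]) (cs.length : Int) = some c :=
        PySem.List.pyGet?_append_length cs [] c
      have hhead : (PySem.List.pyRange 0 (cs.length : Int)).map
          (fun j => (10:Int) ^ ((((cs.length : Int) + 1) - j - 1).toNat) *
            pvDigitOpt (PySem.List.pyGet? (cs ++ [c]) j))
          = (PySem.List.pyRange 0 (cs.length : Int)).map
          (fun j => 10 * ((10:Int) ^ (((cs.length : Int) - j - 1).toNat) *
            pvDigitOpt (PySem.List.pyGet? cs j))) := by
        apply List.map_congr_left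
        intro j hj
        rw [PySem.List.mem_pyRange_one] at hj
        have hget : PySem.List.pyGet? (cs ++ [c]) j = PySem.List.pyGet? cs j := by
          rw [PySem.List.pyGet?_of_nonneg _ hj.1, PySem.List.pyGet?_of_nonneg _ hj.1]
          have hlt : j.toNat < cs.length := by omega
          rw [List.getElem?_append_left hlt]
        have hexp : (((cs.length : Int) + 1) - j - 1).toNat
            = (((cs.length : Int)) - j - 1).toNat + 1 := by omega
        rw [hget, hexp, pow_succ]
        ring
      rw [hhead, List.sum_map_mul_left, ih]
      simp only [List.map_cons, List.map_nil, List.sum_cons, List.sum_nil,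
        List.foldl_cons, List.foldl_nil, hlast, pvDigitOpt, Option.map_some,
        Option.getD_some]
      have h0 : ((cs.length : Int) + 1 - (cs.length : Int) - 1).toNat = 0 := by omega
      rw [h0]
      ring

theorem pv_convert_eq (moji : String) : convert moji = convert_alt moji := by
  unfold convert convert_alt
  have hb : (fun (num j : Int) =>
      let keta : Int := 10 ^ (PySem.Str.len moji - j - 1).toNat
      let num := if PySem.Str.pyGet? moji j = some 'A' then num + keta * 1 else num
      let num := if PySem.Str.pyGet? moji j = some 'C' then num + keta * 2 else num
      let num := if PySem.Str.pyGet? moji j = some 'G' then num + keta * 3 else num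
      if PySem.Str.pyGet? moji j = some 'T' then num + keta * 4 else num)
      = fun (num j : Int) => num + 10 ^ ((PySem.Str.len moji - j - 1).toNat) *
          pvDigitOpt (PySem.Str.pyGet? moji j) := by
    funext num j; exact pv_body_eq moji (PySem.Str.len moji) num j
  simp only []
  rw [hb, PySem.List.foldl_add, zero_add, PySem.Str.len_eq]
  have hsg : ∀ j : Int, PySem.Str.pyGet? moji j = PySem.List.pyGet? moji.toList j := by
    intro j; rfl
  simp only [hsg]
  exact pv_sum_eq_horner moji.toList

-- ===== VERDICT (by name: the statement is the Claim_ definition above) =====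
theorem convert_spec : Claim_equal_convert := by
  intro moji _
  exact pv_convert_eq moji
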